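-- pv_equiv track=rewrite | github.com/federico-fiorini/thesis | user_profile.py | split_by_root_category
-- ===== SOURCE A (Python) =====
-- def get_root(category):
--     return category.strip('/').split('/')[0]
--
-- def split_by_root_category(categories):
--
--     root_categories = {}
--
--     for category, score in categories.items():
--         root = get_root(category)
--         try:
--             root_categories[root][category] = score
--         except KeyError:
--             root_categories[root] = {}
--             root_categories[root][category] = score
--
--     return root_categories
-- ===== SOURCE B (Python) =====
-- def get_root(category):
--     return category.strip('/').split('/')[0]
--
-- def split_by_root_category(categories):
--     roots = dict.fromkeys(get_root(c) for c in categories)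
--     return {root: {c: s for c, s in categories.items() if get_root(c) == root}
--             for root in roots}
-- ===== Notes on version B (the rewrite author's own statement) =====
-- stated objective: simpler
-- what changed: Replaces A's single-pass try/except insertion into a nested mutable dict by two declarative passes: dedup the roots in first-occurrence order, then build each root's group with a filtering dict comprehension.
import Mathlib
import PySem

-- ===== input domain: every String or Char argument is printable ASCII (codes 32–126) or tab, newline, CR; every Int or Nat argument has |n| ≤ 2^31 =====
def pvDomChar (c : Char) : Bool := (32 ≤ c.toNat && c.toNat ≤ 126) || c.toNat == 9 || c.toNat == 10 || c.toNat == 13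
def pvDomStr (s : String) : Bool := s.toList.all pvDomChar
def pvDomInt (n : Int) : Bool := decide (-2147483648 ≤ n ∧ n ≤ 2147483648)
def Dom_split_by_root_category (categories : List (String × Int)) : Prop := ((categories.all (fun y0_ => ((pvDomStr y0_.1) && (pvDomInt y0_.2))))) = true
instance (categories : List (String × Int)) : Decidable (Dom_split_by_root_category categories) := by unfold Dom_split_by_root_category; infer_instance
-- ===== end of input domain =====

-- B replaces A's single-pass try/except dict insertion by two declarative passes
-- (dedup the roots, then one filtering dict comprehension per root); objective: simpler.

-- ===== PORT A =====
-- get_root(category) = category.strip('/').split('/')[0]. The separator "/" is nonempty so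
-- split? is always `some`, and s.split('/') is never empty so Python's [0] never raises:
-- the .getD totalizations are exact.
def get_root (category : String) : String :=
  PySem.List.pyGetD ((PySem.Str.split? (PySem.Str.stripChars category "/") "/").getD []) 0 ""

def split_by_root_category (categories : List (String × Int)) : List (String × List (String × Int)) :=
  (categories.foldl
    (fun rc p =>
      let root := get_root p.1
      match rc.get? root with                                   -- try: root_categories[root][category] = score
      | some inner => rc.insert root (inner.insert p.1 p.2)
      | none =>                                                 -- except KeyError:
          (rc.insert root PySem.Dict.empty).insert root         --   root_categories[root] = {}
            ((PySem.Dict.empty : PySem.Dict String Int).insert p.1 p.2))  -- root_categories[root][category] = score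
    (PySem.Dict.empty : PySem.Dict String (PySem.Dict String Int))).items.map
      (fun q => (q.1, q.2.items))

-- ===== PORT B =====
def split_by_root_category_alt (categories : List (String × Int)) : List (String × List (String × Int)) :=
  let roots := PySem.List.dedup (categories.map (fun p => get_root p.1))   -- dict.fromkeys(...)
  roots.map (fun r =>
    (r, ((categories.filter (fun p => get_root p.1 == r)).foldl           -- {c: s for c, s in … if …}
          (fun d p => d.insert p.1 p.2)
          (PySem.Dict.empty : PySem.Dict String Int)).items))

-- ===== PRECONDITION & SPEC =====
def Spec_split_by_root_category (categories : List (String × Int)) (out : List (String × List (String × Int))) : Prop := out = split_by_root_category_alt categories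
instance (categories : List (String × Int)) (out : List (String × List (String × Int))) : Decidable (Spec_split_by_root_category categories out) := by unfold Spec_split_by_root_category; infer_instance

-- ===== CLAIM (what is proved, stated in full; the proofs are below) =====
def Claim_equal_split_by_root_category : Prop := ∀ (categories : List (String × Int)), Dom_split_by_root_category categories → Spec_split_by_root_category categories (split_by_root_category categories)

-- ===== LEMMAS AND PROOFS =====

-- A's loop body, written as a single insert (the two except-branch inserts collapse).
def stepA (rc : PySem.Dict String (PySem.Dict String Int)) (p : String × Int) :
    PySem.Dict String (PySem.Dict String Int) :=
  rc.insert (get_root p.1) ((rc.getD (get_root p.1) PySem.Dict.empty).insert p.1 p.2)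

theorem stepA_eq (rc : PySem.Dict String (PySem.Dict String Int)) (p : String × Int) :
    (let root := get_root p.1
     match rc.get? root with
     | some inner => rc.insert root (inner.insert p.1 p.2)
     | none =>
         (rc.insert root PySem.Dict.empty).insert root
           ((PySem.Dict.empty : PySem.Dict String Int).insert p.1 p.2)) = stepA rc p := by
  unfold stepA
  dsimp only
  cases h : rc.get? (get_root p.1) with
  | none =>
      simp [PySem.Dict.insert_insert_self, PySem.Dict.getD_of_get?_eq_none _ PySem.Dict.empty h]
  | some inner =>
      simp [PySem.Dict.getD_of_get?_eq_some _ PySem.Dict.empty h]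

theorem foldA_eq (categories : List (String × Int)) :
    categories.foldl
      (fun rc p =>
        let root := get_root p.1
        match rc.get? root with
        | some inner => rc.insert root (inner.insert p.1 p.2)
        | none =>
            (rc.insert root PySem.Dict.empty).insert root
              ((PySem.Dict.empty : PySem.Dict String Int).insert p.1 p.2))
      (PySem.Dict.empty : PySem.Dict String (PySem.Dict String Int))
    = categories.foldl stepA PySem.Dict.empty := by
  have hf : (fun (rc : PySem.Dict String (PySem.Dict String Int)) (p : String × Int) =>
      let root := get_root p.1
      match rc.get? root with
      | some inner => rc.insert root (inner.insert p.1 p.2)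
      | none =>
          (rc.insert root PySem.Dict.empty).insert root
            ((PySem.Dict.empty : PySem.Dict String Int).insert p.1 p.2)) = stepA := by
    funext rc p; exact stepA_eq rc p
  rw [hf]

theorem keys_foldA (categories : List (String × Int)) :
    (categories.foldl stepA PySem.Dict.empty).keys
      = PySem.List.dedup (categories.map (fun p => get_root p.1)) := by
  unfold stepA
  rw [PySem.Dict.keys_foldl_insert_key]
  simp [PySem.Set.update_nil_left]

theorem nodup_keys_foldA (categories : List (String × Int)) :
    (categories.foldl stepA PySem.Dict.empty).keys.Nodup := by
  unfold stepA
  exact PySem.Dict.nodup_keys_foldl_insert_key _ _ _ _ (by simp)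

theorem getD_foldA (categories : List (String × Int))
    (d : PySem.Dict String (PySem.Dict String Int)) (r : String) :
    (categories.foldl stepA d).getD r PySem.Dict.empty
      = (categories.filter (fun p => get_root p.1 == r)).foldl
          (fun di p => di.insert p.1 p.2) (d.getD r PySem.Dict.empty) := by
  induction categories generalizing d with
  | nil => rfl
  | cons p xs ih =>
      simp only [List.foldl_cons, List.filter_cons]
      rw [ih]
      by_cases h : get_root p.1 = r
      · subst h
        simp [stepA, PySem.Dict.getD_insert_self]
      · have hb : (get_root p.1 == r) = false := by simp [h]
        simp only [hb, Bool.false_eq_true, if_false]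
        rw [show (stepA d p).getD r PySem.Dict.empty = d.getD r PySem.Dict.empty from by
          simp [stepA, PySem.Dict.getD_insert_of_ne _ _ _ (Ne.symm h)]]

-- ===== VERDICT (by name: the statement is the Claim_ definition above) =====
theorem split_by_root_category_spec : Claim_equal_split_by_root_category := by
  intro categories _
  unfold Spec_split_by_root_category split_by_root_category split_by_root_category_alt
  rw [foldA_eq]
  rw [PySem.Dict.items_eq_map_keys _ (nodup_keys_foldA categories) PySem.Dict.empty]
  rw [List.map_map, keys_foldA]
  refine List.map_congr_left ?_
  intro r _
  simp only [Function.comp]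
  rw [getD_foldA]
  simp [PySem.Dict.getD_empty]
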